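-- pv_equiv track=rewrite | github.com/ZzzMarlik/CSC108_Python | CSC108_2017S/A2 2017 winter/stress_and_rhyme_functions.py | convert_to_lines
-- ===== SOURCE A (Python) =====
-- def convert_to_lines(poem):
--     r""" (str) -> list of str
--
--     Return a list of the lines in poem, with leading and trailing whitespace
--     removed from each poem line, and leading and trailing blank lines removed.
--     Blank lines between stanzas are reduced to a single blank line.
--
--     >>> convert_to_lines(SMALL_POEM)
--     ["I'll sit here instead,", '', 'A cloud on my head']
--     >>> convert_to_lines('\nOne,\n\n\ntwo,\nthree.\n\n')
--     ['One,', '', 'two,', 'three.']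
--     """
--     line = poem.strip()
--     acc = ''
--     i = 0
--     while i < len(line):
--         if line[i] != '\n':
--             acc += line[i]
--         if line[i] == '\n' and line[i + 1] != '\n' and line[i - 1] != '\n':
--             acc += '\n'
--         elif line[i] == '\n' and line[i + 1] != '\n':
--             acc += '\n\n'
--         i += 1
--     return acc.split('\n')
-- ===== SOURCE B (Python) =====
-- def convert_to_lines(poem):
--     r""" (str) -> list of str
--
--     Return a list of the lines in poem, with leading and trailing blank lines
--     removed and runs of blank lines between stanzas reduced to a single blank line.
--     """
--     res = []
--     for p in poem.strip().split('\n'):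
--         if p == '':
--             if res and res[-1] != '':
--                 res.append('')
--         else:
--             res.append(p)
--     return res if res else ['']
-- ===== Notes on version B (the rewrite author's own statement) =====
-- stated objective: faster
-- what changed: Replaced the indexed character-by-character scan with lookahead/lookbehind that rebuilds the string via repeated string concatenation before splitting by: split the stripped poem on newlines first, then one run-compression pass over the line list that drops repeated/leading empty lines.
import Mathlib
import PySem

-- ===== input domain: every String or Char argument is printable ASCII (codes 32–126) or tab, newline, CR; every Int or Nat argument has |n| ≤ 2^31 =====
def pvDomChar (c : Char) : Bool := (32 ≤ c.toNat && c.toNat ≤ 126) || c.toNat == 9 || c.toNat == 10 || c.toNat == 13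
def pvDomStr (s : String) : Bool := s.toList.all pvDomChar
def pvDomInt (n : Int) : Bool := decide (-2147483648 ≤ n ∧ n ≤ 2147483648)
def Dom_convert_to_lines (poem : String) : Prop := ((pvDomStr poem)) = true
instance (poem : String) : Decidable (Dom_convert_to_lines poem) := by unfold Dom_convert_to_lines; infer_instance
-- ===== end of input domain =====

-- B replaces A's indexed char scan (with lookahead/lookbehind) by split-on-newline
-- followed by one run-compression pass over the line list; objective: simpler.

-- ===== PORT A =====
-- the while loop of A: index i over the stripped string, acc built char by char
def pvALoop (cs : List Char) (i : Nat) (acc : List Char) : List Char :=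
  if _h : i < cs.length then
    let c := PySem.List.pyGetD cs (i : Int) ' '
    let acc1 := if c ≠ '\n' then acc ++ [c] else acc
    let acc2 :=
      if c = '\n' ∧ PySem.List.pyGetD cs ((i : Int) + 1) ' ' ≠ '\n' ∧
          PySem.List.pyGetD cs ((i : Int) - 1) ' ' ≠ '\n' then acc1 ++ ['\n']
      else if c = '\n' ∧ PySem.List.pyGetD cs ((i : Int) + 1) ' ' ≠ '\n' then acc1 ++ ['\n', '\n']
      else acc1
    pvALoop cs (i + 1) acc2
  else acc
termination_by cs.length - i

def convert_to_lines (poem : String) : List String :=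
  let line := PySem.Chars.strip poem.toList
  let acc := pvALoop line 0 []
  (PySem.Chars.splitOn acc ['\n']).map String.ofList

-- ===== PORT B =====
-- body of B's for loop: keep a nonempty line; keep an empty line only after a kept nonempty one
def pvBStep (res : List (List Char)) (p : List Char) : List (List Char) :=
  if p = [] then (if res ≠ [] ∧ res.getLast? ≠ some [] then res ++ [[]] else res) else res ++ [p]

def convert_to_lines_alt (poem : String) : List String :=
  let parts := PySem.Chars.splitOn (PySem.Chars.strip poem.toList) ['\n']
  let res := parts.foldl pvBStep []
  if res = [] then [""] else res.map String.ofList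

-- ===== PRECONDITION & SPEC =====
def Spec_convert_to_lines (poem : String) (out : List String) : Prop := out = convert_to_lines_alt poem
instance (poem : String) (out : List String) : Decidable (Spec_convert_to_lines poem out) := by unfold Spec_convert_to_lines; infer_instance

-- ===== CLAIM (what is proved, stated in full; the proofs are below) =====
def Claim_equal_convert_to_lines : Prop := ∀ (poem : String), Dom_convert_to_lines poem → Spec_convert_to_lines poem (convert_to_lines poem)

-- ===== LEMMAS AND PROOFS =====

-- PySem.Chars.splitOn with a single-character separator is Mathlib's List.splitOn
theorem pvSplitOnGo (d : Char) : ∀ (l : List Char) (fuel : Nat) (cur : List Char) (acc : List (List Char)), l.length < fuel →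
    PySem.Chars.splitOn.go [d] fuel l cur acc = acc.reverse ++ (l.splitOn d).modifyHead (cur.reverse ++ ·) := by
  intro l
  induction l with
  | nil =>
    intro fuel cur acc h
    cases fuel with
    | zero => omega
    | succ f => simp [PySem.Chars.splitOn.go, List.splitOn, List.splitOnP, List.splitOnP.go]
  | cons c rest ih =>
    intro fuel cur acc h
    simp only [List.length_cons] at h
    cases fuel with
    | zero => omega
    | succ f =>
      by_cases hc : c = d
      · subst hc
        rw [show PySem.Chars.splitOn.go [c] (f+1) (c :: rest) cur acc
              = PySem.Chars.splitOn.go [c] f rest [] (cur.reverse :: acc) from by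
            simp [PySem.Chars.splitOn.go]]
        rw [ih f [] (cur.reverse :: acc) (by omega)]
        simp only [List.splitOn]; rw [List.splitOnP_cons]
        rw [if_pos (by simp)]; simp; exact congrFun List.modifyHead_id _
      · rw [show PySem.Chars.splitOn.go [d] (f+1) (c :: rest) cur acc
              = PySem.Chars.splitOn.go [d] f rest (c :: cur) acc from by
            simp only [PySem.Chars.splitOn.go]
            rw [if_neg (by simp [List.isPrefixOf]; intro h; exact absurd h.symm hc)]]
        rw [ih f (c :: cur) acc (by omega)]
        simp only [List.splitOn]; rw [List.splitOnP_cons]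
        rw [if_neg (by simp [hc])]
        cases hsp : List.splitOnP (fun x => x == d) rest with
        | nil => exact absurd hsp (List.splitOnP_ne_nil _ _)
        | cons a b => simp

theorem pvSplitOn_eq (cs : List Char) (d : Char) : PySem.Chars.splitOn cs [d] = cs.splitOn d := by
  rw [show PySem.Chars.splitOn cs [d] = PySem.Chars.splitOn.go [d] (cs.length + 1) cs [] [] from rfl]
  rw [pvSplitOnGo d cs (cs.length + 1) [] [] (by omega)]
  simp
  exact congrFun List.modifyHead_id _

-- the separator never occurs inside a piece of splitOn
theorem pvSplitOn_not_mem (d : Char) : ∀ (xs : List Char), ∀ u ∈ xs.splitOn d, d ∉ u := by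
  intro xs
  induction xs with
  | nil => intro u hu; simp [List.splitOn, List.splitOnP, List.splitOnP.go] at hu; simp [hu]
  | cons c rest ih =>
    intro u hu
    simp only [List.splitOn, List.splitOnP_cons] at hu ih
    by_cases hc : c = d
    · rw [if_pos (by simp [hc])] at hu
      rcases List.mem_cons.mp hu with h | h
      · simp [h]
      · exact ih u h
    · rw [if_neg (by simp [hc])] at hu
      cases hsp : List.splitOnP (fun x => x == d) rest with
      | nil => exact absurd hsp (List.splitOnP_ne_nil _ _)
      | cons a b =>
        rw [hsp] at hu ih
        rcases List.mem_cons.mp hu with h | h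
        · subst h
          intro hd
          rcases List.mem_cons.mp hd with h | h
          · exact hc h.symm
          · exact ih a (by simp) h
        · exact ih u (by simp [h])

-- the characters of a tail segment list, each segment preceded by its newline
def pvFlat (L : List (List Char)) : List Char := L.flatMap (fun u => '\n' :: u)

theorem pvIntercalate_eq (s : List Char) (L : List (List Char)) :
    ['\n'].intercalate (s :: L) = s ++ pvFlat L := by
  induction L generalizing s with
  | nil => simp [List.intercalate, pvFlat]
  | cons u rest ih =>
    rw [show ['\n'].intercalate (s :: u :: rest) = s ++ ['\n'] ++ ['\n'].intercalate (u :: rest) from by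
      simp [List.intercalate]]
    rw [ih u]
    simp [pvFlat]

-- functional model of A's loop: recursion over the remaining characters, carrying the previous one
def pvCollapse (prev : Char) : List Char → List Char
  | [] => []
  | c :: rest =>
    (if c ≠ '\n' then [c] else []) ++
    (if c = '\n' ∧ rest.headD ' ' ≠ '\n' then (if prev ≠ '\n' then ['\n'] else ['\n', '\n']) else []) ++
    pvCollapse c rest

theorem pvALoop_eq (cs : List Char) : ∀ (n i : Nat) (acc : List Char), cs.length - i ≤ n →
    pvALoop cs i acc = acc ++ pvCollapse (PySem.List.pyGetD cs ((i : Int) - 1) ' ') (cs.drop i) := by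
  intro n
  induction n with
  | zero =>
    intro i acc h
    have hge : cs.length ≤ i := by omega
    rw [pvALoop, dif_neg (by omega)]
    rw [List.drop_of_length_le hge]
    simp [pvCollapse]
  | succ m ih =>
    intro i acc h
    by_cases hi : i < cs.length
    · have hdrop : cs.drop i = cs[i] :: cs.drop (i + 1) := List.drop_eq_getElem_cons hi
      have hci : PySem.List.pyGetD cs (i : Int) ' ' = cs[i] := by
        rw [PySem.List.pyGetD_natCast]
        exact List.getD_eq_getElem cs ' ' hi
      have hnxt : PySem.List.pyGetD cs ((i : Int) + 1) ' ' = (cs.drop (i + 1)).headD ' ' := by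
        rw [show ((i : Int) + 1) = ((i + 1 : Nat) : Int) by push_cast; ring]
        rw [PySem.List.pyGetD_natCast]
        rw [List.headD_eq_head?_getD, List.head?_drop]
        rw [List.getD_eq_getElem?_getD]
      rw [pvALoop, dif_pos hi]
      simp only
      rw [ih (i + 1) _ (by omega)]
      rw [hdrop]
      rw [show pvCollapse (PySem.List.pyGetD cs ((i:Int) - 1) ' ') (cs[i] :: cs.drop (i+1))
            = (if cs[i] ≠ '\n' then [cs[i]] else []) ++
              (if cs[i] = '\n' ∧ (cs.drop (i+1)).headD ' ' ≠ '\n' then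
                 (if PySem.List.pyGetD cs ((i:Int) - 1) ' ' ≠ '\n' then ['\n'] else ['\n', '\n']) else []) ++
              pvCollapse cs[i] (cs.drop (i+1)) from rfl]
      rw [show ((i + 1 : Nat) : Int) - 1 = (i : Int) by push_cast; ring, hci, hnxt]
      rw [List.headD_eq_head?_getD, List.head?_drop]
      by_cases h1 : cs[i] = '\n'
      · by_cases h2 : cs[i + 1]?.getD ' ' = '\n'
        · simp [h1, h2]
        · by_cases h3 : PySem.List.pyGetD cs ((i : Int) - 1) ' ' = '\n'
          · simp [h1, h2, h3]
          · simp [h1, h2, h3]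
      · simp [h1]
    · rw [pvALoop, dif_neg hi]
      rw [List.drop_of_length_le (by omega)]
      simp [pvCollapse]

theorem pvCollapse_append (s : List Char) (hs : '\n' ∉ s) (prev : Char) (rest : List Char) :
    pvCollapse prev (s ++ rest) = s ++ pvCollapse (s.getLastD prev) rest := by
  induction s generalizing prev with
  | nil => simp
  | cons c s' ih =>
    have hc : c ≠ '\n' := fun h => hs (h ▸ List.mem_cons_self)
    rw [List.cons_append]
    rw [show pvCollapse prev (c :: (s' ++ rest)) =
        (if c ≠ '\n' then [c] else []) ++
        (if c = '\n' ∧ (s' ++ rest).headD ' ' ≠ '\n' then (if prev ≠ '\n' then ['\n'] else ['\n', '\n']) else []) ++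
        pvCollapse c (s' ++ rest) from rfl]
    rw [if_pos hc, if_neg (by simp [hc])]
    rw [ih (fun h => hs (List.mem_cons_of_mem _ h)) c]
    simp
    congr 1
    cases s' with
    | nil => simp
    | cons a b =>
      cases hgl : (a :: b).getLast? with
      | none => simp at hgl
      | some x => simp [hgl]

-- run-compression of the tail segments; the Bool is whether the last kept segment is nonempty
def pvG : Bool → List (List Char) → List (List Char)
  | _, [] => []
  | b, u :: rest => if u = [] then (if b then [] :: pvG false rest else pvG false rest) else u :: pvG true rest

theorem pvG_subset (b : Bool) (L : List (List Char)) : ∀ u ∈ pvG b L, u ∈ L := by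
  induction L generalizing b with
  | nil => simp [pvG]
  | cons v rest ih =>
    intro u hu
    simp only [pvG] at hu
    by_cases hv : v = []
    · rw [if_pos hv] at hu
      cases b with
      | true =>
        simp at hu
        rcases hu with h | h
        · simp [hv, h]
        · exact List.mem_cons_of_mem _ (ih false u h)
      | false => simp at hu; exact List.mem_cons_of_mem _ (ih false u hu)
    · rw [if_neg hv] at hu
      rcases List.mem_cons.mp hu with h | h
      · simp [h]
      · exact List.mem_cons_of_mem _ (ih true u h)

-- core: A's collapse of the tail characters is the join of the compressed tail segments
theorem pvMain : ∀ (L : List (List Char)), (∀ u ∈ L, '\n' ∉ u) → L.getLast? ≠ some [] →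
    (∀ prev, prev ≠ '\n' → pvCollapse prev (pvFlat L) = pvFlat (pvG true L)) ∧
    (L ≠ [] → pvCollapse '\n' (pvFlat L) = '\n' :: pvFlat (pvG false L)) := by
  intro L
  induction L with
  | nil => intro _ _; exact ⟨fun prev _ => by simp [pvFlat, pvG, pvCollapse], fun h => absurd rfl h⟩
  | cons u rest ih =>
    intro hnm hlast
    have hnm' : ∀ v ∈ rest, '\n' ∉ v := fun v hv => hnm v (List.mem_cons_of_mem _ hv)
    have hlast' : rest.getLast? ≠ some [] := by
      cases rest with
      | nil => simp
      | cons a b => rw [List.getLast?_cons_cons] at hlast; exact hlast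
    obtain ⟨ihT, ihF⟩ := ih hnm' hlast'
    constructor
    · intro prev hprev
      rw [show pvFlat (u :: rest) = '\n' :: (u ++ pvFlat rest) from by simp [pvFlat]]
      rw [show pvCollapse prev ('\n' :: (u ++ pvFlat rest)) =
          (if ('\n' : Char) ≠ '\n' then ['\n'] else []) ++
          (if ('\n' : Char) = '\n' ∧ (u ++ pvFlat rest).headD ' ' ≠ '\n' then
            (if prev ≠ '\n' then ['\n'] else ['\n', '\n']) else []) ++
          pvCollapse '\n' (u ++ pvFlat rest) from rfl]
      cases u with
      | nil =>
        have hrest : rest ≠ [] := by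
          intro h; subst h; simp at hlast
        simp only [List.nil_append]
        have hhead : (pvFlat rest).headD ' ' = '\n' := by
          cases rest with
          | nil => exact absurd rfl hrest
          | cons a b => simp [pvFlat]
        rw [hhead]
        rw [if_neg (by simp), if_neg (by simp)]
        simp only [List.nil_append]
        rw [ihF hrest]
        simp [pvG, pvFlat]
      | cons x u' =>
        have hx : x ≠ '\n' := fun h => hnm (x :: u') List.mem_cons_self (h ▸ List.mem_cons_self)
        have hhead : ((x :: u') ++ pvFlat rest).headD ' ' = x := by simp
        rw [hhead]
        rw [if_neg (by simp), if_pos ⟨rfl, hx⟩, if_pos hprev]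
        rw [pvCollapse_append (x :: u') (hnm _ List.mem_cons_self) '\n']
        have hgl : ((x :: u').getLastD '\n') ≠ '\n' := by
          have : (x :: u').getLastD '\n' ∈ (x :: u') := by
            rw [List.getLastD_eq_getLast? ]
            rw [List.getLast?_eq_some_getLast (by simp)]
            exact List.getLast_mem (by simp)
          exact fun h => hnm _ List.mem_cons_self (h ▸ this)
        rw [ihT _ hgl]
        rw [show pvG true ((x :: u') :: rest) = (x :: u') :: pvG true rest from by simp [pvG]]
        simp [pvFlat]
    · intro _
      rw [show pvFlat (u :: rest) = '\n' :: (u ++ pvFlat rest) from by simp [pvFlat]]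
      rw [show pvCollapse '\n' ('\n' :: (u ++ pvFlat rest)) =
          (if ('\n' : Char) ≠ '\n' then ['\n'] else []) ++
          (if ('\n' : Char) = '\n' ∧ (u ++ pvFlat rest).headD ' ' ≠ '\n' then
            (if ('\n' : Char) ≠ '\n' then ['\n'] else ['\n', '\n']) else []) ++
          pvCollapse '\n' (u ++ pvFlat rest) from rfl]
      cases u with
      | nil =>
        have hrest : rest ≠ [] := by
          intro h; subst h; simp at hlast
        simp only [List.nil_append]
        have hhead : (pvFlat rest).headD ' ' = '\n' := by
          cases rest with
          | nil => exact absurd rfl hrest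
          | cons a b => simp [pvFlat]
        rw [hhead]
        rw [if_neg (by simp), if_neg (by simp)]
        simp only [List.nil_append]
        rw [ihF hrest]
        simp [pvG]
      | cons x u' =>
        have hx : x ≠ '\n' := fun h => hnm (x :: u') List.mem_cons_self (h ▸ List.mem_cons_self)
        have hhead : ((x :: u') ++ pvFlat rest).headD ' ' = x := by simp
        rw [hhead]
        rw [if_neg (by simp), if_pos ⟨rfl, hx⟩, if_neg (by simp)]
        rw [pvCollapse_append (x :: u') (hnm _ List.mem_cons_self) '\n']
        have hgl : ((x :: u').getLastD '\n') ≠ '\n' := by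
          have : (x :: u').getLastD '\n' ∈ (x :: u') := by
            rw [List.getLastD_eq_getLast? ]
            rw [List.getLast?_eq_some_getLast (by simp)]
            exact List.getLast_mem (by simp)
          exact fun h => hnm _ List.mem_cons_self (h ▸ this)
        rw [ihT _ hgl]
        rw [show pvG false ((x :: u') :: rest) = (x :: u') :: pvG true rest from by simp [pvG]]
        simp [pvFlat]

-- B's fold is run-compression
theorem pvFoldl (L : List (List Char)) : ∀ (res : List (List Char)), res ≠ [] →
    (res.getLast? ≠ some [] → L.foldl pvBStep res = res ++ pvG true L) ∧
    (res.getLast? = some [] → L.foldl pvBStep res = res ++ pvG false L) := by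
  induction L with
  | nil => intro res _; exact ⟨fun _ => by simp [pvG], fun _ => by simp [pvG]⟩
  | cons u rest ih =>
    intro res hres
    constructor
    · intro hlast
      by_cases hu : u = []
      · subst hu
        rw [show List.foldl pvBStep res ([] :: rest) = List.foldl pvBStep (res ++ [[]]) rest from by
          simp [pvBStep, hres, hlast]]
        obtain ⟨_, h2⟩ := ih (res ++ [[]]) (by simp)
        rw [h2 (by simp)]
        simp [pvG]
      · rw [show List.foldl pvBStep res (u :: rest) = List.foldl pvBStep (res ++ [u]) rest from by
          simp [pvBStep, hu]]
        obtain ⟨h1, _⟩ := ih (res ++ [u]) (by simp)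
        rw [h1 (by simp [hu])]
        simp [pvG, hu]
    · intro hlast
      by_cases hu : u = []
      · subst hu
        rw [show List.foldl pvBStep res ([] :: rest) = List.foldl pvBStep res rest from by
          simp [pvBStep, hlast]]
        obtain ⟨_, h2⟩ := ih res hres
        rw [h2 hlast]
        simp [pvG]
      · rw [show List.foldl pvBStep res (u :: rest) = List.foldl pvBStep (res ++ [u]) rest from by
          simp [pvBStep, hu]]
        obtain ⟨h1, _⟩ := ih (res ++ [u]) (by simp)
        rw [h1 (by simp [hu])]
        simp [pvG, hu]

-- stripped strings do not start or end with a newline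
theorem pvStrip_getLast (l : List Char) : (PySem.Chars.strip l).getLast? ≠ some '\n' := by
  simp only [PySem.Chars.strip, PySem.Chars.rstrip, List.getLast?_reverse]
  have := List.head?_dropWhile_not PySem.Chars.isspace (PySem.Chars.lstrip l).reverse
  intro hc
  rw [hc] at this
  simp at this
  exact absurd this (by decide)

theorem pvStrip_head (l : List Char) : (PySem.Chars.strip l).head? ≠ some '\n' := by
  simp only [PySem.Chars.strip, PySem.Chars.rstrip]
  have hpre : ((List.dropWhile PySem.Chars.isspace (PySem.Chars.lstrip l).reverse).reverse : List Char) <+: PySem.Chars.lstrip l := by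
    have := List.dropWhile_suffix (l := (PySem.Chars.lstrip l).reverse) (p := PySem.Chars.isspace)
    simpa using this.reverse
  intro hc
  have h0 : (PySem.Chars.lstrip l).head? = some '\n' := by
    rcases hpre with ⟨t, ht⟩
    rw [← ht]
    cases hh : (List.dropWhile PySem.Chars.isspace (PySem.Chars.lstrip l).reverse).reverse with
    | nil => simp [hh] at hc
    | cons a b => rw [hh] at hc; simp at hc; subst hc; simp
  have := List.head?_dropWhile_not PySem.Chars.isspace l
  rw [show PySem.Chars.lstrip l = List.dropWhile PySem.Chars.isspace l from rfl] at h0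
  rw [h0] at this
  simp at this
  exact absurd this (by decide)

theorem pvGetD_neg_one (cs : List Char) (h : cs ≠ []) (d : Char) :
    PySem.List.pyGetD cs (-1) d = cs.getLast?.getD d := by
  have hl : 0 < cs.length := List.length_pos_iff.mpr h
  simp only [PySem.List.pyGetD, PySem.List.pyGet?, PySem.List.pyIdx?]
  rw [if_neg (by omega), if_pos (by omega)]
  simp [List.getLast?_eq_getElem?, Int.toNat_one]

-- ===== VERDICT (by name: the statement is the Claim_ definition above) =====
theorem convert_to_lines_spec : Claim_equal_convert_to_lines := by
  intro poem _
  unfold Spec_convert_to_lines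
  simp only [convert_to_lines, convert_to_lines_alt]
  set t := PySem.Chars.strip poem.toList with htdef
  by_cases ht : t = []
  · rw [ht]
    rw [show pvALoop [] 0 [] = [] from by rw [pvALoop]; simp]
    rfl
  · have hheadt := pvStrip_head poem.toList
    have hlastt := pvStrip_getLast poem.toList
    rw [← htdef] at hheadt hlastt
    cases hsegs : t.splitOn '\n' with
    | nil => exact absurd hsegs (List.splitOnP_ne_nil _ _)
    | cons s L =>
      have hjoin : ['\n'].intercalate (s :: L) = t := by
        rw [← hsegs]; exact List.intercalate_splitOn t '\n'
      have ht2 : t = s ++ pvFlat L := by rw [← hjoin, pvIntercalate_eq]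
      have hnomem : ∀ u ∈ s :: L, '\n' ∉ u := by
        rw [← hsegs]; exact pvSplitOn_not_mem '\n' t
      have hs_ne : s ≠ [] := by
        intro h
        subst h
        cases L with
        | nil => simp [pvFlat] at ht2; exact ht ht2
        | cons v L' =>
          rw [show pvFlat (v :: L') = '\n' :: (v ++ pvFlat L') from by simp [pvFlat]] at ht2
          rw [List.nil_append] at ht2
          rw [ht2] at hheadt
          simp at hheadt
      have hLlast : L.getLast? ≠ some [] := by
        intro hL
        obtain ⟨L', rfl⟩ := List.getLast?_eq_some_iff.mp hL
        rw [show pvFlat (L' ++ [[]]) = pvFlat L' ++ ['\n'] from by simp [pvFlat]] at ht2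
        rw [ht2] at hlastt
        rw [show s ++ (pvFlat L' ++ ['\n']) = (s ++ pvFlat L') ++ ['\n'] from by simp] at hlastt
        rw [List.getLast?_concat] at hlastt
        exact hlastt rfl
      -- A side
      rw [pvALoop_eq t t.length 0 [] (by omega)]
      rw [List.drop_zero, List.nil_append]
      rw [show ((0 : Nat) : Int) - 1 = -1 by ring]
      rw [pvGetD_neg_one t ht ' ']
      set prev := t.getLast?.getD ' ' with hprevdef
      rw [ht2, pvCollapse_append s (hnomem s List.mem_cons_self) prev]
      have hgl2 : s.getLastD prev ≠ '\n' := by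
        have hmem : s.getLastD prev ∈ s := by
          rw [List.getLastD_eq_getLast?, List.getLast?_eq_some_getLast hs_ne]
          exact List.getLast_mem hs_ne
        exact fun h => hnomem s List.mem_cons_self (h ▸ hmem)
      rw [(pvMain L (fun u hu => hnomem u (List.mem_cons_of_mem _ hu)) hLlast).1 _ hgl2]
      rw [← pvIntercalate_eq s (pvG true L)]
      rw [pvSplitOn_eq]
      rw [List.splitOn_intercalate (s :: pvG true L) '\n'
        (by intro u hu
            rcases List.mem_cons.mp hu with h | h
            · subst h; exact hnomem u List.mem_cons_self
            · exact hnomem u (List.mem_cons_of_mem _ (pvG_subset true L u h)))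
        (by simp)]
      -- B side
      rw [← ht2, pvSplitOn_eq, hsegs]
      rw [show List.foldl pvBStep [] (s :: L) = List.foldl pvBStep [s] L from by
        simp [pvBStep, hs_ne]]
      rw [(pvFoldl L [s] (by simp)).1 (by simpa using fun h => hs_ne h)]
      rw [if_neg (by simp)]
      rfl
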